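-- pv_equiv track=rewrite | github.com/PavelGem-13g/VMK-courses | Grade 10/14.04.2021/task 5.py | f
-- ===== SOURCE A (Python) =====
-- def f(n,count):
--     count+=1
--     if count>1000:
--         return 0
--     if n<=5:
--         return n
--     elif n>5 and n%5==0:
--         return n+f(n//5-1,count)
--     elif n>5 and n%5!=0:
--         return n+f(n+6,count)
-- ===== SOURCE B (Python) =====
-- def f(n, count):
--     # Phase 1: materialise the path of visited values (bounded by the call cap),
--     # Phase 2: sum it.
--     path = []
--     for _ in range(max(0, 1000 - count)):
--         path.append(n)
--         if n <= 5:
--             break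
--         n = n // 5 - 1 if n % 5 == 0 else n + 6
--     return sum(path)
-- ===== Notes on version B (the rewrite author's own statement) =====
-- stated objective: alternative
-- what changed: Replaced the bounded recursion (sum built on the call stack) by a two-phase computation: first materialise the bounded list of visited values with an iterative loop, then sum that list.
import Mathlib
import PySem

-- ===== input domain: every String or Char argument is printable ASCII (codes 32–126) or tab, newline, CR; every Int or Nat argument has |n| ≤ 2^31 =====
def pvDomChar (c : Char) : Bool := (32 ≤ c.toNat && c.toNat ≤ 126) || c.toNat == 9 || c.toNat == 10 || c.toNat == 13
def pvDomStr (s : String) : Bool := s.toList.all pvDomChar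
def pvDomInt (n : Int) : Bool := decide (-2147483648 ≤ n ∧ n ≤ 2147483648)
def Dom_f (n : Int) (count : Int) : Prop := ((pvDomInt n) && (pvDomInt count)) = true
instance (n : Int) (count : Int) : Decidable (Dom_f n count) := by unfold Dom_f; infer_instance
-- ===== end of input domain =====

-- B replaces A's bounded recursion by building the bounded list of visited values and summing it (alternative decomposition, same cost).


-- ===== PORT A =====
-- Structural recursion on the fuel (1001 - count).toNat, the exact number of calls the
-- Python cap still permits; the fuel-0 branch coincides with Python's 'count > 1000 → 0'.
def fGo : Nat → Int → Int → Int
  | 0, _n, _count => 0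
  | fuel + 1, n, count =>
    if count + 1 > 1000 then 0
    else if n ≤ 5 then n
    else if n > 5 ∧ PySem.Int.mod n 5 = 0 then
      n + fGo fuel (PySem.Int.floordiv n 5 - 1) (count + 1)
    else
      n + fGo fuel (n + 6) (count + 1)

def f (n : Int) (count : Int) : Int := fGo (1001 - count).toNat n count

-- ===== PORT B =====
-- Phase 1: build the list of visited values, the loop running at most max(0, 1000-count) times
-- (Source B's 'for _ in range' with break); Phase 2: sum the list.
def fPath : Nat → Int → List Int
  | 0, _n => []
  | fuel + 1, n =>
    if n ≤ 5 then [n]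
    else n :: fPath fuel (if PySem.Int.mod n 5 = 0 then PySem.Int.floordiv n 5 - 1 else n + 6)

def f_alt (n : Int) (count : Int) : Int := (fPath (1000 - count).toNat n).sum

-- ===== PRECONDITION & SPEC =====
def Spec_f (n : Int) (count : Int) (out : Int) : Prop := out = f_alt n count
instance (n : Int) (count : Int) (out : Int) : Decidable (Spec_f n count out) := by unfold Spec_f; infer_instance

-- ===== CLAIM (what is proved, stated in full; the proofs are below) =====
def Claim_equal_f : Prop := ∀ (n : Int) (count : Int), Dom_f n count → Spec_f n count (f n count)

-- ===== LEMMAS AND PROOFS =====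
theorem fGo_eq_path :
    ∀ (fuel : Nat) (count : Int), (1001 - count).toNat = fuel →
      ∀ n, fGo fuel n count = (fPath (fuel - 1) n).sum := by
  intro fuel
  induction fuel with
  | zero => intro count _ n; simp [fGo, fPath]
  | succ fuel ih =>
    intro count hc n
    by_cases hcap : count + 1 > 1000
    · -- fuel = (1001-count).toNat ≥ 1 forces count ≤ 1000, so here count = 1000, fuel = 0
      have : fuel = 0 := by omega
      subst this
      simp [fGo, fPath, hcap]
    · simp only [fGo, if_neg hcap]
      by_cases hle : n ≤ 5
      · have hf1 : 1 ≤ fuel := by omega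
        cases fuel with
        | zero => omega
        | succ k => simp [fPath, hle]
      · rw [if_neg hle]
        have hpath : fPath (fuel + 1 - 1) n
            = n :: fPath (fuel - 1)
                (if PySem.Int.mod n 5 = 0 then PySem.Int.floordiv n 5 - 1 else n + 6) := by
          have hf : 1 ≤ fuel := by omega
          cases fuel with
          | zero => omega
          | succ k => simp [fPath, hle]
        have hrec : (1001 - (count + 1)).toNat = fuel := by omega
        by_cases hmod : PySem.Int.mod n 5 = 0
        · rw [if_pos ⟨by omega, hmod⟩, hpath, List.sum_cons,
              ih (count + 1) hrec, if_pos hmod]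
        · rw [if_neg (fun hc' => hmod hc'.2), hpath, List.sum_cons,
              ih (count + 1) hrec, if_neg hmod]

-- ===== VERDICT (by name: the statement is the Claim_ definition above) =====
theorem f_spec : Claim_equal_f := by
  intro n count _
  unfold Spec_f f_alt f
  rw [fGo_eq_path (1001 - count).toNat count rfl]
  have h : (1001 - count).toNat - 1 = (1000 - count).toNat := by omega
  rw [h]
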